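-- pv_equiv track=rewrite | github.com/XiniDev/EnGarde | utils.py | convert_binary
-- ===== SOURCE A (Python) =====
-- def convert_binary(numbers: list[int], size: int) -> None:
--     res = []
--     for n in numbers:
--         b = []
--         binary = n
--         for i in range(size):
--             b.append(binary & 1)
--             binary = binary >> 1
--         res.extend(b[::-1])
--     return res
-- ===== SOURCE B (Python) =====
-- def convert_binary(numbers: list[int], size: int) -> None:
--     if size <= 0:
--         return []
--     width = 1 << size
--     res = []
--     for n in numbers:
--         res.extend(int(c) for c in format(n % width, '0{}b'.format(size)))
--     return res
-- ===== Notes on version B (the rewrite author's own statement) =====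
-- stated objective: idiomatic
-- what changed: A extracts each number's low bits LSB-first with a shift-and-mask loop and then reverses the list; B reduces the number modulo 2^size in closed form and emits its fixed-width binary digits MSB-first directly via format(), with an explicit empty result for non-positive size.
import Mathlib
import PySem

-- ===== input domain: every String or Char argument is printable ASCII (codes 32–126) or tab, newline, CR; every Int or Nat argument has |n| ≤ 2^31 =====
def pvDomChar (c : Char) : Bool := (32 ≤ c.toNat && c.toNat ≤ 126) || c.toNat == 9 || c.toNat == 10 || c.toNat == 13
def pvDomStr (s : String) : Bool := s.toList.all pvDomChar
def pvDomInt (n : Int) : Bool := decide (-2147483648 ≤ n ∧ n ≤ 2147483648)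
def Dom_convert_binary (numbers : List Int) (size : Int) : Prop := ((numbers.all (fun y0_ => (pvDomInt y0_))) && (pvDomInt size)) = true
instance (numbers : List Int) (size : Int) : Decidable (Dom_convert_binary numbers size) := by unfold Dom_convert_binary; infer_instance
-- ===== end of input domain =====

-- B replaces A's per-number LSB-extraction loop plus list reversal by a closed-form
-- reduction modulo 2^size followed by direct MSB-first digit formatting (Python: format);
-- objective: simpler/idiomatic, same asymptotic cost.

-- ===== PORT A =====
def convert_binary (numbers : List Int) (size : Int) : List Int :=
  numbers.foldl (fun res n =>
    let st := (PySem.List.pyRange 0 size 1).foldl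
      (fun (st : List Int × Int) _i => (st.1 ++ [PySem.Int.band st.2 1], st.2 >>> (1 : Nat)))
      ([], n)
    -- b[::-1]: a step -1 full slice never fails, hence the .getD []
    res ++ ((PySem.List.slice? st.1 none none (-1)).getD [])) []

-- ===== PORT B =====
-- port of format(v, '0{size}b') (exact for 0 ≤ v < 2^size, the only values B feeds it):
-- the `size` binary digits of v, most significant first
def pyFormatBits : Nat → Int → List Int
  | 0, _ => []
  | w+1, v => pyFormatBits w (v / 2) ++ [v % 2]

def convert_binary_alt (numbers : List Int) (size : Int) : List Int :=
  if size ≤ 0 then []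
  else
    let width : Int := (1 : Int) <<< size.toNat
    numbers.foldl (fun res n => res ++ pyFormatBits size.toNat (PySem.Int.mod n width)) []

-- ===== PRECONDITION & SPEC =====
def Spec_convert_binary (numbers : List Int) (size : Int) (out : List Int) : Prop := out = convert_binary_alt numbers size
instance (numbers : List Int) (size : Int) (out : List Int) : Decidable (Spec_convert_binary numbers size out) := by unfold Spec_convert_binary; infer_instance

-- ===== CLAIM (what is proved, stated in full; the proofs are below) =====
def Claim_equal_convert_binary : Prop := ∀ (numbers : List Int) (size : Int), Dom_convert_binary numbers size → Spec_convert_binary numbers size (convert_binary numbers size)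

-- ===== LEMMAS AND PROOFS =====

-- the sequence of low bits A's inner loop appends (LSB first)
def lsbBits : Nat → Int → List Int
  | 0, _ => []
  | w+1, v => PySem.Int.band v 1 :: lsbBits w (v >>> (1 : Nat))

theorem foldl_inner_eq_lsbBits {β : Type} (l : List β) : ∀ (acc : List Int) (v : Int),
    (l.foldl (fun (st : List Int × Int) _i => (st.1 ++ [PySem.Int.band st.2 1], st.2 >>> (1 : Nat))) (acc, v)).1
      = acc ++ lsbBits l.length v := by
  induction l with
  | nil => intro acc v; simp [lsbBits]
  | cons x xs ih =>
      intro acc v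
      simp only [List.foldl_cons, List.length_cons, lsbBits, ih]
      simp

theorem emod_pow_succ_ediv_two (v : Int) (w : Nat) :
    (v % 2^(w+1)) / 2 = (v / 2) % 2^w := by
  have hp : (0:Int) < 2^w := by positivity
  have hps : (0:Int) < 2^(w+1) := by positivity
  set r := v % 2^(w+1) with hr
  set q := v / 2^(w+1) with hq
  have hr0 : 0 ≤ r := Int.emod_nonneg v (by positivity)
  have hrlt : r < 2^(w+1) := Int.emod_lt_of_pos v hps
  have hv : v = r + (2^w * q) * 2 := by
    have h := Int.mul_ediv_add_emod v (2^(w+1))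
    have h2 : (2:Int)^(w+1) = 2^w * 2 := by ring
    rw [← hr, ← hq, h2] at h
    linarith
  have hdiv : v / 2 = r / 2 + 2^w * q := by
    rw [hv, Int.add_mul_ediv_right _ _ (by norm_num : (2:Int) ≠ 0)]
  rw [hdiv, Int.add_mul_emod_self_left]
  have h1 : 0 ≤ r / 2 := Int.ediv_nonneg hr0 (by norm_num)
  have h2 : r / 2 < 2^w := by
    have h2' : r < 2^w * 2 := by
      have h2'' : (2:Int)^(w+1) = 2^w * 2 := by ring
      rw [h2''] at hrlt; exact hrlt
    omega
  exact (Int.emod_eq_of_lt h1 h2).symm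

theorem reverse_lsbBits (w : Nat) : ∀ (v : Int),
    (lsbBits w v).reverse = pyFormatBits w (v % 2^w) := by
  induction w with
  | zero => intro v; simp [lsbBits, pyFormatBits]
  | succ w ih =>
      intro v
      simp only [lsbBits, pyFormatBits, List.reverse_cons, ih]
      have hsh : v >>> (1 : Nat) = v / 2 := by
        simpa using Int.shiftRight_eq_div_pow v 1
      have hb : PySem.Int.band v 1 = v % 2 := by
        rw [PySem.Int.band_one, PySem.Int.mod_eq_emod_of_pos (by norm_num)]
      have hm : (v % 2^(w+1)) % 2 = v % 2 :=
        Int.emod_emod_of_dvd v ⟨2^w, by ring⟩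
      rw [hsh, hb, emod_pow_succ_ediv_two, hm]

theorem foldl_append_nil (l : List Int) : ∀ (acc : List Int),
    l.foldl (fun (r : List Int) (_ : Int) => r ++ ([] : List Int)) acc = acc := by
  induction l with
  | nil => intro acc; rfl
  | cons x xs ih => intro acc; rw [List.foldl_cons, List.append_nil]; exact ih acc

-- ===== VERDICT (by name: the statement is the Claim_ definition above) =====
theorem convert_binary_spec : Claim_equal_convert_binary := by
  intro numbers size _
  unfold Spec_convert_binary convert_binary convert_binary_alt
  by_cases hs : size ≤ 0
  · have hrange : PySem.List.pyRange 0 size 1 = [] := by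
      simp [PySem.List.pyRange, show ¬ (0:Int) < size by omega]
    simp only [hrange, List.foldl_nil, PySem.List.slice?_none_none_neg_one,
      List.reverse_nil, Option.getD_some, if_pos hs]
    exact foldl_append_nil numbers []
  · have hw : size = (size.toNat : Int) := by omega
    set w := size.toNat with hwdef
    rw [if_neg hs]
    have hwidth : (1 : Int) <<< w = 2^w := by
      rw [Int.shiftLeft_eq]; ring
    have hfun : (fun (res : List Int) (n : Int) =>
        res ++ ((PySem.List.slice?
          ((PySem.List.pyRange 0 size 1).foldl
            (fun (st : List Int × Int) _i => (st.1 ++ [PySem.Int.band st.2 1], st.2 >>> (1 : Nat)))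
            ([], n)).1 none none (-1)).getD []))
        = (fun (res : List Int) (n : Int) => res ++ pyFormatBits w (PySem.Int.mod n ((1 : Int) <<< w))) := by
      funext res n
      rw [hw, PySem.List.pyRange_zero_natCast, foldl_inner_eq_lsbBits,
        PySem.List.slice?_none_none_neg_one]
      simp only [Option.getD_some, List.nil_append, List.length_map, List.length_range]
      rw [reverse_lsbBits, hwidth,
        PySem.Int.mod_eq_emod_of_pos (by positivity : (0:Int) < 2^w)]
    simp only [hfun]
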